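-- pv_equiv track=rewrite | github.com/happybits/napfs | napfs/helpers.py | get_max_from_contiguous_byte_ranges
-- ===== SOURCE A (Python) =====
-- def get_max_from_contiguous_byte_ranges(parts):
--     """
--     given a parsed list of min/max byte ranges in ascending order,
--     figure out what is the max contiguous byte range uploaded so far.
--     We use this to determine what part of the upload we can stream back to the
--     client. Since there's no guarantee what order the uploader will send the
--     chunks of the video file, we have to be careful to only serve up the part
--     of the video file that is readable so far.
--     :param parts: list
--     :return: int
--     """
--     sorted_parts = sorted(parts)
--
--     # If the part list doesn't start with 0, there is no content available
--     try:
--         if sorted_parts[0][0] != 0: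
--             return 0
--     except IndexError:
--         return 0
--
--     mp = None
--     # pylint: disable=unsubscriptable-object
--     for p in sorted_parts:
--         if mp is None or (p[0] - 1 <= mp[1] and p[1] >= mp[1]):
--             mp = p
--     return 0 if mp is None else mp[1]
-- ===== SOURCE B (Python) =====
-- def get_max_from_contiguous_byte_ranges(parts):
--     if not parts:
--         return 0
--     start, reach = min(parts)
--     if start != 0:
--         return 0
--     changed = True
--     while changed:
--         changed = False
--         for s, e in parts:
--             if s - 1 <= reach and reach < e:
--                 reach = e
--                 changed = True
--     return reach
-- ===== Notes on version B (the rewrite author's own statement) =====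
-- stated objective: alternative
-- what changed: Replaces A's sort-then-single-forward-merge (tracking the last merged part) with a sort-free algorithm: seed reach with the end of the lexicographically minimal part and repeatedly scan the unsorted list, extending reach by any part that touches it, until a full scan makes no change (a reachable-fixpoint computation).
import Mathlib
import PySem

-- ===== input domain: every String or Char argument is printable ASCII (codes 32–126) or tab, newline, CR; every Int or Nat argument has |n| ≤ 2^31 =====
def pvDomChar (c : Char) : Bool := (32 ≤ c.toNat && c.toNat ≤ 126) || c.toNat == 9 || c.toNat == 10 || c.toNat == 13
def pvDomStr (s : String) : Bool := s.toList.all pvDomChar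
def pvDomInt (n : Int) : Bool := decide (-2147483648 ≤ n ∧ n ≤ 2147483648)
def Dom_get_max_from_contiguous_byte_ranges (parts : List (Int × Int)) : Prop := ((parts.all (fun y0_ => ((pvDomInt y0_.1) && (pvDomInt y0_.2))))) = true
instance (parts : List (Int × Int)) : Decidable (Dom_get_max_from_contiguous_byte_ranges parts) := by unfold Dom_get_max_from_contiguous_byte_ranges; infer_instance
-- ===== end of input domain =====

-- B replaces A's sort-then-single-forward-merge by a sort-free repeated-scan fixpoint
-- seeded with the end of the minimal part (objective: alternative algorithm, same results).


-- ===== PORT A =====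
-- sorted(parts) on int pairs: Python's lexicographic tuple order = sorted2 with fst/snd keys
def get_max_from_contiguous_byte_ranges (parts : List (Int × Int)) : Int :=
  let sorted_parts := PySem.List.sorted2 parts Prod.fst Prod.snd
  match PySem.List.pyGet? sorted_parts 0 with
  | none => 0          -- except IndexError: return 0
  | some h =>
    if h.1 ≠ 0 then 0
    else
      let mp := sorted_parts.foldl
        (fun mp p => match mp with
          | none => some p
          | some m => if p.1 - 1 ≤ m.2 ∧ p.2 ≥ m.2 then some p else some m) none
      match mp with
      | none => (0 : Int)
      | some m => m.2

-- ===== PORT B =====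
-- one inner 'for s, e in parts' scan of Source B: state = (reach, changed)
def pvScan (st : Int × Bool) (p : Int × Int) : Int × Bool :=
  if p.1 - 1 ≤ st.1 ∧ st.1 < p.2 then (p.2, true) else st

def pvPass (reach : Int) (parts : List (Int × Int)) : Int × Bool :=
  parts.foldl pvScan (reach, false)

-- termination facts for the while-loop (cited by pvLoop's decreasing_by)
theorem pvScan_foldl_mono (l : List (Int × Int)) (st : Int × Bool) :
    st.1 ≤ (l.foldl pvScan st).1 ∧
      ((l.foldl pvScan st).1 = st.1 ∨ ∃ p ∈ l, (l.foldl pvScan st).1 = p.2) := by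
  induction l generalizing st with
  | nil => exact ⟨le_refl _, Or.inl rfl⟩
  | cons x t ih =>
    simp only [List.foldl_cons]
    rcases ih (pvScan st x) with ⟨h1, h2⟩
    unfold pvScan at *
    split_ifs at h1 h2 ⊢ with hc
    · refine ⟨le_trans (by omega) h1, ?_⟩
      rcases h2 with h2 | ⟨p, hp, he⟩
      · exact Or.inr ⟨x, by simp, by simpa using h2⟩
      · exact Or.inr ⟨p, by simp [hp], he⟩
    · refine ⟨h1, ?_⟩
      rcases h2 with h2 | ⟨p, hp, he⟩
      · exact Or.inl h2
      · exact Or.inr ⟨p, by simp [hp], he⟩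

theorem pvPass_progress (reach : Int) (parts : List (Int × Int))
    (h : (pvPass reach parts).2 = true) :
    reach < (pvPass reach parts).1 ∧ ∃ p ∈ parts, (pvPass reach parts).1 = p.2 := by
  unfold pvPass at *
  induction parts generalizing reach with
  | nil => simp at h
  | cons x t ih =>
    simp only [List.foldl_cons] at h ⊢
    by_cases hc : x.1 - 1 ≤ reach ∧ reach < x.2
    · have hx : pvScan (reach, false) x = (x.2, true) := by
        unfold pvScan; rw [if_pos]; exact hc
      rw [hx] at h ⊢
      rcases pvScan_foldl_mono t (x.2, true) with ⟨h1, h2⟩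
      refine ⟨lt_of_lt_of_le (by omega) h1, ?_⟩
      rcases h2 with h2 | ⟨p, hp, he⟩
      · exact ⟨x, by simp, by simpa using h2⟩
      · exact ⟨p, by simp [hp], he⟩
    · have hx : pvScan (reach, false) x = (reach, false) := by
        unfold pvScan; rw [if_neg]; exact hc
      rw [hx] at h ⊢
      rcases ih reach h with ⟨h1, p, hp, he⟩
      exact ⟨h1, p, by simp [hp], he⟩

theorem pvFilter_lt (l : List (Int × Int)) (a b : Int) (hab : a < b)
    (hb : ∃ p ∈ l, p.2 = b) :
    (l.filter (fun p => b < p.2)).length < (l.filter (fun p => a < p.2)).length := by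
  induction l with
  | nil => simp at hb
  | cons q t ih =>
    have hmono : (t.filter (fun p => decide (b < p.2))).length
        ≤ (t.filter (fun p => decide (a < p.2))).length :=
      List.Sublist.length_le (List.monotone_filter_right t (by intro x hx; simp at hx ⊢; omega))
    simp only [List.filter_cons]
    rcases hb with ⟨p, hp, hpe⟩
    rcases List.mem_cons.mp hp with rfl | hpt
    · have e1 : decide (b < p.2) = false := by simp [hpe]
      have e2 : decide (a < p.2) = true := by rw [hpe]; simp [hab]
      rw [e1, e2]
      simp only [Bool.false_eq_true, if_false, if_true, List.length_cons]
      omega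
    · have hlt := ih ⟨p, hpt, hpe⟩
      by_cases hq : b < q.2
      · have e1 : decide (b < q.2) = true := by simp [hq]
        have e2 : decide (a < q.2) = true := by simp; omega
        rw [e1, e2]
        simp only [if_true, List.length_cons]
        omega
      · have e1 : decide (b < q.2) = false := by simp [hq]
        rw [e1]
        simp only [Bool.false_eq_true, if_false]
        split
        · simp only [List.length_cons]; omega
        · omega

def pvLoop (reach : Int) (parts : List (Int × Int)) : Int :=
  if h : (pvPass reach parts).2 = true then pvLoop (pvPass reach parts).1 parts else reach
termination_by (parts.filter (fun p => reach < p.2)).length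
decreasing_by
  rcases pvPass_progress reach parts h with ⟨h1, p, hp, he⟩
  exact pvFilter_lt parts reach _ h1 ⟨p, hp, he.symm⟩

def get_max_from_contiguous_byte_ranges_alt (parts : List (Int × Int)) : Int :=
  match PySem.List.min2? parts Prod.fst Prod.snd with
  | none => 0                     -- if not parts: return 0
  | some m =>
    if m.1 ≠ 0 then 0
    else pvLoop m.2 parts

-- ===== PRECONDITION & SPEC =====
def Spec_get_max_from_contiguous_byte_ranges (parts : List (Int × Int)) (out : Int) : Prop := out = get_max_from_contiguous_byte_ranges_alt parts
instance (parts : List (Int × Int)) (out : Int) : Decidable (Spec_get_max_from_contiguous_byte_ranges parts out) := by unfold Spec_get_max_from_contiguous_byte_ranges; infer_instance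

-- ===== CLAIM (what is proved, stated in full; the proofs are below) =====
def Claim_equal_get_max_from_contiguous_byte_ranges : Prop := ∀ (parts : List (Int × Int)), Dom_get_max_from_contiguous_byte_ranges parts → Spec_get_max_from_contiguous_byte_ranges parts (get_max_from_contiguous_byte_ranges parts)

-- ===== LEMMAS AND PROOFS =====

theorem pvScan_foldl_flag (l : List (Int × Int)) (st : Int × Bool) (h : st.2 = true) :
    (l.foldl pvScan st).2 = true := by
  induction l generalizing st with
  | nil => exact h
  | cons x t ih =>
    simp only [List.foldl_cons]
    apply ih
    unfold pvScan
    split_ifs <;> simp [h]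


-- Python's strict lexicographic '<' on int pairs, exactly as sorted2/min2? compare
def pvPlt (a b : Int × Int) : Bool :=
  decide (a.1 < b.1) || (!decide (b.1 < a.1) && decide (a.2 < b.2))

theorem pvPlt_iff (a b : Int × Int) :
    pvPlt a b = true ↔ (a.1 < b.1 ∨ (a.1 = b.1 ∧ a.2 < b.2)) := by
  simp [pvPlt]; omega

theorem pvPlt_false (a b : Int × Int) :
    pvPlt a b = false ↔ (b.1 < a.1 ∨ (b.1 = a.1 ∧ b.2 ≤ a.2)) := by
  simp only [Bool.eq_false_iff, ne_eq, pvPlt_iff]; omega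

-- one coverage-extension step: reach r can be extended to the end of a touching part
def PvStep (parts : List (Int × Int)) (r r' : Int) : Prop :=
  ∃ p ∈ parts, p.1 - 1 ≤ r ∧ r < p.2 ∧ r' = p.2

def PvReach (parts : List (Int × Int)) : Int → Int → Prop :=
  Relation.ReflTransGen (PvStep parts)

def PvFix (parts : List (Int × Int)) (r : Int) : Prop :=
  ∀ p ∈ parts, p.1 - 1 ≤ r → p.2 ≤ r

theorem pvReach_le {parts : List (Int × Int)} {r r' : Int} (h : PvReach parts r r') : r ≤ r' := by
  induction h with
  | refl => exact le_refl _
  | tail _ hstep ih => rcases hstep with ⟨p, _, _, h2, rfl⟩; omega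

theorem pvReach_le_of_fix {parts : List (Int × Int)} {s a b : Int}
    (hb : PvReach parts s b) (hsa : s ≤ a) (hfa : PvFix parts a) : b ≤ a := by
  induction hb with
  | refl => exact hsa
  | tail _ hstep ih =>
    rcases hstep with ⟨p, hp, h1, h2, rfl⟩
    exact hfa p hp (by omega)

theorem pvFix_unique {parts : List (Int × Int)} {s a b : Int}
    (ha : PvReach parts s a) (hb : PvReach parts s b)
    (hfa : PvFix parts a) (hfb : PvFix parts b) : a = b :=
  le_antisymm (pvReach_le_of_fix ha (pvReach_le hb) hfb)
              (pvReach_le_of_fix hb (pvReach_le ha) hfa)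

-- ---------- B side ----------

theorem pvPass_reach (parts : List (Int × Int)) :
    ∀ (l : List (Int × Int)) (st : Int × Bool), (∀ p ∈ l, p ∈ parts) →
      PvReach parts st.1 ((l.foldl pvScan st).1) := by
  intro l
  induction l with
  | nil => intro st _; exact Relation.ReflTransGen.refl
  | cons x t ih =>
    intro st hsub
    simp only [List.foldl_cons]
    by_cases hc : x.1 - 1 ≤ st.1 ∧ st.1 < x.2
    · have hx : pvScan st x = (x.2, true) := by simp [pvScan, hc]
      rw [hx]
      refine Relation.ReflTransGen.head ?_ (ih (x.2, true) (fun p hp => hsub p (by simp [hp])))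
      exact ⟨x, hsub x (by simp), hc.1, hc.2, rfl⟩
    · have hx : pvScan st x = st := by unfold pvScan; rw [if_neg]; exact hc
      rw [hx]
      exact ih st (fun p hp => hsub p (by simp [hp]))

theorem pvPass_false (parts : List (Int × Int)) (r : Int)
    (h : (pvPass r parts).2 = false) : (pvPass r parts).1 = r ∧ PvFix parts r := by
  unfold pvPass at *
  have key : ∀ (l : List (Int × Int)) (r : Int), (l.foldl pvScan (r, false)).2 = false →
      (l.foldl pvScan (r, false)).1 = r ∧ ∀ p ∈ l, ¬(p.1 - 1 ≤ r ∧ r < p.2) := by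
    intro l
    induction l with
    | nil => intro r _; exact ⟨rfl, by simp⟩
    | cons x t ih =>
      intro r hf
      simp only [List.foldl_cons] at hf ⊢
      by_cases hc : x.1 - 1 ≤ r ∧ r < x.2
      · have hx : pvScan (r, false) x = (x.2, true) := by simp [pvScan, hc]
        rw [hx] at hf
        have := pvScan_foldl_flag t (x.2, true) rfl
        rw [this] at hf; exact absurd hf (by simp)
      · have hx : pvScan (r, false) x = (r, false) := by unfold pvScan; rw [if_neg]; exact hc
        rw [hx] at hf ⊢
        rcases ih r hf with ⟨h1, h2⟩
        refine ⟨h1, ?_⟩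
        intro p hp
        rcases List.mem_cons.mp hp with rfl | hpt
        · exact hc
        · exact h2 p hpt
  rcases key parts r h with ⟨h1, h2⟩
  exact ⟨h1, fun p hp hle => by have := h2 p hp; omega⟩

theorem pvLoop_spec (reach : Int) (parts : List (Int × Int)) :
    PvReach parts reach (pvLoop reach parts) ∧ PvFix parts (pvLoop reach parts) := by
  induction reach using pvLoop.induct parts with
  | case1 reach h ih =>
    rw [pvLoop, dif_pos h]
    refine ⟨Relation.ReflTransGen.trans ?_ ih.1, ih.2⟩
    exact pvPass_reach parts parts (reach, false) (fun p hp => hp)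
  | case2 reach h =>
    rw [pvLoop, dif_neg h]
    have h' : (pvPass reach parts).2 = false := by
      cases hb : (pvPass reach parts).2
      · rfl
      · exact absurd hb h
    exact ⟨Relation.ReflTransGen.refl, (pvPass_false parts reach h').2⟩

-- ---------- A side ----------

-- A's loop body once mp is set (mp only matters through its second component)
def pvMerge (m p : Int × Int) : Int × Int :=
  if p.1 - 1 ≤ m.2 ∧ p.2 ≥ m.2 then p else m

theorem pvOptFold_eq (t : List (Int × Int)) (m : Int × Int) :
    (t.foldl (fun mp p => match mp with
        | none => some p
        | some m => if p.1 - 1 ≤ m.2 ∧ p.2 ≥ m.2 then some p else some m) (some m))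
      = some (t.foldl pvMerge m) := by
  induction t generalizing m with
  | nil => rfl
  | cons x t ih =>
    simp only [List.foldl_cons]
    rw [show (if x.1 - 1 ≤ m.2 ∧ x.2 ≥ m.2 then some x else some m) = some (pvMerge m x) by
      unfold pvMerge; split_ifs <;> rfl]
    exact ih (pvMerge m x)

theorem pvMerge_mono (t : List (Int × Int)) (m : Int × Int) :
    m.2 ≤ (t.foldl pvMerge m).2 := by
  induction t generalizing m with
  | nil => exact le_refl _
  | cons x t ih =>
    simp only [List.foldl_cons]
    refine le_trans ?_ (ih (pvMerge m x))
    unfold pvMerge; split_ifs with h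
    · exact h.2
    · exact le_refl _

theorem pvMerge_stuck (t : List (Int × Int)) (m : Int × Int)
    (h : ∀ q ∈ t, m.2 < q.1 - 1) : t.foldl pvMerge m = m := by
  induction t with
  | nil => rfl
  | cons x t ih =>
    simp only [List.foldl_cons]
    have hx : pvMerge m x = m := by
      unfold pvMerge
      have := h x (by simp)
      split_ifs with hc
      · omega
      · rfl
    rw [hx]
    exact ih (fun q hq => h q (by simp [hq]))

theorem pvMerge_reach (parts : List (Int × Int)) :
    ∀ (t : List (Int × Int)) (m : Int × Int), (∀ p ∈ t, p ∈ parts) →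
      PvReach parts m.2 ((t.foldl pvMerge m).2) := by
  intro t
  induction t with
  | nil => intro m _; exact Relation.ReflTransGen.refl
  | cons x t ih =>
    intro m hsub
    simp only [List.foldl_cons]
    have htail : ∀ p ∈ t, p ∈ parts := fun p hp => hsub p (by simp [hp])
    by_cases hc : x.1 - 1 ≤ m.2 ∧ x.2 ≥ m.2
    · have hx : pvMerge m x = x := by simp [pvMerge, hc]
      rw [hx]
      rcases eq_or_lt_of_le hc.2 with he | hlt
      · rw [he]
        exact ih x htail
      · refine Relation.ReflTransGen.head ?_ (ih x htail)
        exact ⟨x, hsub x (by simp), hc.1, hlt, rfl⟩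
    · have hx : pvMerge m x = m := by unfold pvMerge; rw [if_neg]; exact hc
      rw [hx]
      exact ih m htail

theorem pvMerge_fix (t : List (Int × Int)) (m : Int × Int)
    (hsorted : t.Pairwise (fun a b => a.1 ≤ b.1)) :
    ∀ p ∈ t, p.1 - 1 ≤ (t.foldl pvMerge m).2 → p.2 ≤ (t.foldl pvMerge m).2 := by
  induction t generalizing m with
  | nil => simp
  | cons x t ih =>
    rcases List.pairwise_cons.mp hsorted with ⟨hx, ht⟩
    intro p hp
    simp only [List.foldl_cons]
    by_cases hc : x.1 - 1 ≤ m.2 ∧ x.2 ≥ m.2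
    · have hxe : pvMerge m x = x := by simp [pvMerge, hc]
      rw [hxe]
      rcases List.mem_cons.mp hp with rfl | hpt
      · intro _; exact pvMerge_mono t p
      · exact ih x ht p hpt
    · have hxe : pvMerge m x = m := by unfold pvMerge; rw [if_neg]; exact hc
      rw [hxe]
      rcases List.mem_cons.mp hp with rfl | hpt
      · -- head failed the merge test
        intro hle
        by_cases h1 : p.1 - 1 ≤ m.2
        · -- then its end was below m.2
          have h2 : p.2 < m.2 := by
            rcases not_and_or.mp hc with h | h
            · omega
            · omega
          have := pvMerge_mono t m
          omega
        · -- its start is beyond reach: the rest of the (sorted) list changes nothing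
          have hstuck : t.foldl pvMerge m = m := by
            apply pvMerge_stuck
            intro q hq
            have := hx q hq
            omega
          rw [hstuck] at hle
          omega
      · exact ih m ht p hpt

-- ---------- sorted2 / min2? characterisations ----------

theorem pvSorted2_eq (parts : List (Int × Int)) :
    PySem.List.sorted2 parts Prod.fst Prod.snd
      = parts.foldl (fun acc x => PySem.List.insertBy pvPlt x acc) [] := rfl

theorem pvInsertBy_pairwise (x : Int × Int) (l : List (Int × Int))
    (h : l.Pairwise (fun a b => pvPlt b a = false)) :
    (PySem.List.insertBy pvPlt x l).Pairwise (fun a b => pvPlt b a = false) := by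
  induction l with
  | nil =>
    simp [PySem.List.insertBy]
  | cons y ys ih =>
    rcases List.pairwise_cons.mp h with ⟨hy, hys⟩
    rw [show PySem.List.insertBy pvPlt x (y :: ys)
        = if pvPlt x y then x :: y :: ys else y :: PySem.List.insertBy pvPlt x ys from rfl]
    split_ifs with hc
    · refine List.pairwise_cons.mpr ⟨?_, h⟩
      intro z hz
      rw [pvPlt_iff] at hc
      rcases List.mem_cons.mp hz with rfl | hzt
      · rw [pvPlt_false]; omega
      · have := hy z hzt
        rw [pvPlt_false] at this ⊢
        omega
    · refine List.pairwise_cons.mpr ⟨?_, ih hys⟩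
      intro z hz
      have hcf : pvPlt x y = false := by
        cases hxy : pvPlt x y
        · rfl
        · exact absurd hxy hc
      rcases (PySem.List.mem_insertBy pvPlt x z ys).mp hz with rfl | hzt
      · rw [pvPlt_false] at hcf ⊢; omega
      · exact hy z hzt

theorem pvSorted2_pairwise (parts : List (Int × Int)) :
    (PySem.List.sorted2 parts Prod.fst Prod.snd).Pairwise (fun a b => pvPlt b a = false) := by
  rw [pvSorted2_eq]
  have : ∀ (l acc : List (Int × Int)), acc.Pairwise (fun a b => pvPlt b a = false) →
      (l.foldl (fun acc x => PySem.List.insertBy pvPlt x acc) acc).Pairwise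
        (fun a b => pvPlt b a = false) := by
    intro l
    induction l with
    | nil => intro acc h; exact h
    | cons x t ih =>
      intro acc h
      exact ih _ (pvInsertBy_pairwise x acc h)
  exact this parts [] (by simp)

theorem pvMin2_spec (l : List (Int × Int)) (m : Int × Int) :
    ∃ m'', (l.foldl (fun acc x => match acc with
        | none => some x
        | some mm => if (decide (x.1 < mm.1) || (!decide (mm.1 < x.1) && decide (x.2 < mm.2))) = true
                     then some x else some mm) (some m))
      = some m'' ∧ (m'' = m ∨ m'' ∈ l) ∧ pvPlt m m'' = false ∧ ∀ y ∈ l, pvPlt y m'' = false := by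
  induction l generalizing m with
  | nil =>
    refine ⟨m, rfl, Or.inl rfl, ?_, by simp⟩
    rw [pvPlt_false]; omega
  | cons x t ih =>
    simp only [List.foldl_cons]
    have hbr : (if (decide (x.1 < m.1) || (!decide (m.1 < x.1) && decide (x.2 < m.2))) = true
        then some x else some m) = if pvPlt x m = true then some x else some m := rfl
    rw [hbr]
    by_cases hc : pvPlt x m = true
    · rw [if_pos hc]
      rcases ih x with ⟨m'', heq, hmem, hle, hall⟩
      rw [pvPlt_iff] at hc
      refine ⟨m'', heq, ?_, ?_, ?_⟩
      · rcases hmem with rfl | hm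
        · exact Or.inr (by simp)
        · exact Or.inr (by simp [hm])
      · rw [pvPlt_false] at hle ⊢; omega
      · intro y hy
        rcases List.mem_cons.mp hy with rfl | hyt
        · rw [pvPlt_false] at hle ⊢; omega
        · exact hall y hyt
    · rw [if_neg hc]
      have hcf : pvPlt x m = false := by
        cases hxm : pvPlt x m
        · rfl
        · exact absurd hxm hc
      rcases ih m with ⟨m'', heq, hmem, hle, hall⟩
      refine ⟨m'', heq, ?_, hle, ?_⟩
      · rcases hmem with rfl | hm
        · exact Or.inl rfl
        · exact Or.inr (by simp [hm])
      · intro y hy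
        rcases List.mem_cons.mp hy with rfl | hyt
        · rw [pvPlt_false] at hcf hle ⊢; omega
        · exact hall y hyt

theorem pvMin2_eq_sortedHead (parts : List (Int × Int)) (m : Int × Int)
    (t : List (Int × Int))
    (hs : PySem.List.sorted2 parts Prod.fst Prod.snd = m :: t) :
    PySem.List.min2? parts Prod.fst Prod.snd = some m := by
  have hperm : (PySem.List.sorted2 parts Prod.fst Prod.snd).Perm parts :=
    PySem.List.sorted2_perm parts Prod.fst Prod.snd false
  rw [hs] at hperm
  have hmem : ∀ y, y ∈ parts ↔ y ∈ m :: t := fun y => (hperm.mem_iff).symm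
  have hmmin : ∀ y ∈ parts, pvPlt y m = false := by
    intro y hy
    rcases List.mem_cons.mp ((hmem y).mp hy) with rfl | hyt
    · rw [pvPlt_false]; omega
    · have hpw := pvSorted2_pairwise parts
      rw [hs] at hpw
      exact (List.pairwise_cons.mp hpw).1 y hyt
  have hmparts : m ∈ parts := (hmem m).mpr (by simp)
  cases parts with
  | nil => simp at hmparts
  | cons x rest =>
    have hdef : PySem.List.min2? (x :: rest) Prod.fst Prod.snd
        = rest.foldl (fun acc y => match acc with
            | none => some y
            | some mm => if (decide (y.1 < mm.1) || (!decide (mm.1 < y.1) && decide (y.2 < mm.2))) = true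
                         then some y else some mm) (some x) := by
      unfold PySem.List.min2?
      simp only [List.foldl_cons]
      congr 1
      funext acc y
      cases acc <;> rfl
    rw [hdef]
    rcases pvMin2_spec rest x with ⟨m'', heq, hmem'', hle, hall⟩
    rw [heq]
    have hm''parts : m'' ∈ x :: rest := by
      rcases hmem'' with rfl | h
      · simp
      · simp [h]
    have h1 : pvPlt m m'' = false := by
      rcases List.mem_cons.mp hmparts with rfl | hmr
      · exact hle
      · exact hall m hmr
    have h2 : pvPlt m'' m = false := hmmin m'' hm''parts
    rw [pvPlt_false] at h1 h2
    have hee : m'' = m := by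
      ext
      · omega
      · omega
    rw [hee]

-- ---------- assembling ----------

theorem pvA_eq (parts : List (Int × Int)) (m : Int × Int) (t : List (Int × Int))
    (hs : PySem.List.sorted2 parts Prod.fst Prod.snd = m :: t) :
    get_max_from_contiguous_byte_ranges parts
      = if m.1 ≠ 0 then 0 else (t.foldl pvMerge m).2 := by
  simp only [get_max_from_contiguous_byte_ranges, hs, PySem.List.pyGet?_zero_cons,
    List.foldl_cons]
  split_ifs with h0
  · rfl
  · rw [show (List.foldl (fun mp p => match mp with
        | none => some p
        | some m => if p.1 - 1 ≤ m.2 ∧ p.2 ≥ m.2 then some p else some m) (some m) t)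
        = some (t.foldl pvMerge m) from pvOptFold_eq t m]

theorem get_max_spec_aux (parts : List (Int × Int)) :
    get_max_from_contiguous_byte_ranges parts = get_max_from_contiguous_byte_ranges_alt parts := by
  cases hs : PySem.List.sorted2 parts Prod.fst Prod.snd with
  | nil =>
    have hperm : (PySem.List.sorted2 parts Prod.fst Prod.snd).Perm parts :=
      PySem.List.sorted2_perm parts Prod.fst Prod.snd false
    rw [hs] at hperm
    have : parts = [] := hperm.symm.eq_nil
    subst this
    rfl
  | cons m t =>
    have hperm : (PySem.List.sorted2 parts Prod.fst Prod.snd).Perm parts :=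
      PySem.List.sorted2_perm parts Prod.fst Prod.snd false
    rw [hs] at hperm
    have hmemt : ∀ p ∈ t, p ∈ parts := fun p hp => hperm.mem_iff.mp (by simp [hp])
    have hmemp : ∀ p ∈ parts, p = m ∨ p ∈ t := fun p hp => List.mem_cons.mp (hperm.mem_iff.mpr hp)
    have hmin := pvMin2_eq_sortedHead parts m t hs
    rw [pvA_eq parts m t hs]
    simp only [get_max_from_contiguous_byte_ranges_alt, hmin]
    split_ifs with h0
    · rfl
    · -- both sides compute the unique fixpoint reachable from m.2
      have hA_reach : PvReach parts m.2 ((t.foldl pvMerge m).2) :=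
        pvMerge_reach parts t m hmemt
      have hA_fix : PvFix parts ((t.foldl pvMerge m).2) := by
        intro p hp hle
        rcases hmemp p hp with rfl | hpt
        · exact pvMerge_mono t p
        · have hpw := pvSorted2_pairwise parts
          rw [hs] at hpw
          have ht : t.Pairwise (fun a b => a.1 ≤ b.1) :=
            (List.pairwise_cons.mp hpw).2.imp (by
              intro a b hab
              rw [pvPlt_false] at hab
              omega)
          exact pvMerge_fix t m ht p hpt hle
      rcases pvLoop_spec m.2 parts with ⟨hB_reach, hB_fix⟩
      exact pvFix_unique hA_reach hB_reach hA_fix hB_fix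

-- ===== VERDICT (by name: the statement is the Claim_ definition above) =====
theorem get_max_from_contiguous_byte_ranges_spec : Claim_equal_get_max_from_contiguous_byte_ranges := by
  intro parts _
  unfold Spec_get_max_from_contiguous_byte_ranges
  exact get_max_spec_aux parts
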